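-- pv_equiv track=rewrite | github.com/Natkuma01/DSA_ProblemSet | Unit5/Version2.py | wealthiest_customer
-- ===== SOURCE A (Python) =====
-- def wealthiest_customer(accounts):
--     total = 0
--     max_money = 0
--     index = 0
--
--     for i, value in enumerate(accounts):
--         total = sum(value)
--         if total > max_money:
--             max_money = total
--             index = i
--     return [index, max_money]
-- ===== SOURCE B (Python) =====
-- def wealthiest_customer(accounts):
--     totals = [sum(a) for a in accounts]
--     best = max(totals)
--     return [totals.index(best), best]
-- ===== Notes on version B (the rewrite author's own statement) =====
-- stated objective: idiomatic
-- what changed: Replaces A's fused max-tracking enumerate loop with a build-then-query decomposition: build the list of row totals, take max(totals), recover the first-occurrence index with totals.index; Pre_ excludes the empty list, on which B's max(totals) raises ValueError while A returns its [0, 0] baseline.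
-- intended difference: On nonempty inputs whose row totals are all <= 0 and whose first row total is nonzero, A returns [0, 0] because max_money starts at 0 and the strict comparison never fires, while B returns the first index of the true maximum total and that total, which is the intended wealthiest customer. — e.g. on wealthiest_customer([[-5], [-3]]): A returns [0, 0], B returns [1, -3]
-- outside the precondition, e.g. on wealthiest_customer([]): A returns [0, 0], B raises ValueError
import Mathlib
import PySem

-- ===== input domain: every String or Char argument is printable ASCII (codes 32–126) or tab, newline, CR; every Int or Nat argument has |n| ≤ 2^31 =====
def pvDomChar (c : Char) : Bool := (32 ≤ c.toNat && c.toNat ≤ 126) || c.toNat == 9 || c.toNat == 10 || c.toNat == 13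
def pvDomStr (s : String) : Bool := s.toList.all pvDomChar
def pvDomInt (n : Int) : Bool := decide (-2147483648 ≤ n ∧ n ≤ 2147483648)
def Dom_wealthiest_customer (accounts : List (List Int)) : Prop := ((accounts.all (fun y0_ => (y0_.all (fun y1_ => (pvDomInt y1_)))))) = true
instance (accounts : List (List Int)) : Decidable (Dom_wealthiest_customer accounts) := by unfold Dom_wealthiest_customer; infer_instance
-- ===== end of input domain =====

-- B builds the totals list and queries it with max and .index instead of A's fused
-- max-tracking scan; same cost (idiomatic decomposition). B differs from A on the D_ inputs below.

-- ===== PORT A =====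
-- state is (max_money, index); `total` is recomputed from each row exactly as in A
def wealthiest_customer (accounts : List (List Int)) : List Int :=
  let st := (PySem.List.enumerate accounts 0).foldl
    (fun (st : Int × Int) (p : Int × List Int) =>
      let total := p.2.sum
      if total > st.1 then (total, p.1) else st) (0, 0)
  [st.2, st.1]

-- ===== PORT B =====
-- max(totals) raises on [], excluded by Pre_; the .getD defaults are never reached inside Pre_
def wealthiest_customer_alt (accounts : List (List Int)) : List Int :=
  let totals := accounts.map (fun a => a.sum)
  let best := (PySem.List.max? totals (fun x => x)).getD 0
  [(((PySem.List.index? totals best).getD 0 : Nat) : Int), best]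

-- ===== PRECONDITION & SPEC =====
-- Pre_ excludes only the empty list: there A returns its [0, 0] baseline while B's max(totals) raises ValueError.
def Pre_wealthiest_customer (accounts : List (List Int)) : Prop := accounts ≠ []
instance (accounts : List (List Int)) : Decidable (Pre_wealthiest_customer accounts) := by unfold Pre_wealthiest_customer; infer_instance
def pvWitness_wealthiest_customer : List (List Int) := [[1, 2], [3]]

-- On nonempty inputs whose row totals are all ≤ 0 and whose first row total is nonzero, A returns
-- [0, 0] (max_money starts at 0 and the strict comparison never fires) while B returns the first
-- index of the true maximum total together with that total, which is the intended answer.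
def D_wealthiest_customer (accounts : List (List Int)) : Prop :=
  accounts ≠ [] ∧ (∀ t ∈ accounts.map (fun a => a.sum), t ≤ 0) ∧
    (accounts.map (fun a => a.sum)).head? ≠ some 0
instance (accounts : List (List Int)) : Decidable (D_wealthiest_customer accounts) := by unfold D_wealthiest_customer; infer_instance

def Spec_wealthiest_customer (accounts : List (List Int)) (out : List Int) : Prop := ¬ D_wealthiest_customer accounts → out = wealthiest_customer_alt accounts
instance (accounts : List (List Int)) (out : List Int) : Decidable (Spec_wealthiest_customer accounts out) := by unfold Spec_wealthiest_customer; infer_instance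

def pvDiffWitness_wealthiest_customer : List (List Int) := [[-5], [-3]]
def pvDiffWitnessOut_wealthiest_customer : (List Int) × (List Int) := ([0, 0], [1, -3])

-- ===== CLAIM (what is proved, stated in full; the proofs are below) =====
def Claim_unchanged_wealthiest_customer : Prop := ∀ (accounts : List (List Int)), Dom_wealthiest_customer accounts → Pre_wealthiest_customer accounts → Spec_wealthiest_customer accounts (wealthiest_customer accounts)
def Claim_changed_wealthiest_customer : Prop := Dom_wealthiest_customer (pvDiffWitness_wealthiest_customer) ∧ Pre_wealthiest_customer (pvDiffWitness_wealthiest_customer) ∧ D_wealthiest_customer (pvDiffWitness_wealthiest_customer) ∧ wealthiest_customer (pvDiffWitness_wealthiest_customer) = pvDiffWitnessOut_wealthiest_customer.1 ∧ wealthiest_customer_alt (pvDiffWitness_wealthiest_customer) = pvDiffWitnessOut_wealthiest_customer.2 ∧ pvDiffWitnessOut_wealthiest_customer.1 ≠ pvDiffWitnessOut_wealthiest_customer.2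
def Claim_exact_wealthiest_customer : Prop := ∀ (accounts : List (List Int)), Dom_wealthiest_customer accounts → Pre_wealthiest_customer accounts → D_wealthiest_customer accounts → wealthiest_customer accounts ≠ wealthiest_customer_alt accounts

-- ===== LEMMAS AND PROOFS =====

theorem foldl_max_max (l : List Int) : ∀ (a b : Int), l.foldl max (max a b) = max a (l.foldl max b) := by
  induction l with
  | nil => intro a b; simp
  | cons x t ih =>
      intro a b
      simp only [List.foldl_cons, max_assoc, ih]

theorem max?_cons_some (x : Int) (xs : List Int) (b : Int)
    (h : PySem.List.max? xs (fun y => y) = some b) :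
    PySem.List.max? (x :: xs) (fun y => y) = some (max x b) := by
  cases xs with
  | nil => rw [show PySem.List.max? ([] : List Int) (fun y => y) = none from
      (PySem.List.max?_eq_none_iff _ _).mpr rfl] at h; cases h
  | cons u us =>
      rw [PySem.List.max?_id_cons u us] at h
      rw [PySem.List.max?_id_cons x (u :: us)]
      simp only [List.foldl_cons]
      rw [foldl_max_max us x u]
      injection h with h
      rw [h]

-- forward-scan characterisation of A's loop over an arbitrary tail, start index and state
theorem loopA_char (l : List (List Int)) : ∀ (s mm idx : Int),
    (PySem.List.enumerate l s).foldl
      (fun (st : Int × Int) (p : Int × List Int) =>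
        let total := p.2.sum
        if total > st.1 then (total, p.1) else st) (mm, idx) =
    match PySem.List.max? (l.map (fun a => a.sum)) (fun x => x) with
    | none => (mm, idx)
    | some b => if mm < b
        then (b, s + (((PySem.List.index? (l.map (fun a => a.sum)) b).getD 0 : Nat) : Int))
        else (mm, idx) := by
  induction l with
  | nil => intro s mm idx; simp [PySem.List.enumerate_nil, PySem.List.max?]
  | cons r t ih =>
      intro s mm idx
      rw [PySem.List.enumerate_cons, List.foldl_cons]
      simp only [List.map_cons]
      cases hmt : PySem.List.max? (t.map (fun a => a.sum)) (fun x => x) with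
      | none =>
          have ht : t.map (fun a => a.sum) = [] := (PySem.List.max?_eq_none_iff _ _).mp hmt
          rw [ht]
          rw [show PySem.List.max? [r.sum] (fun x => x) = some r.sum by
            rw [PySem.List.max?_id_cons r.sum []]; rfl]
          by_cases h : r.sum > mm
          · rw [if_pos h, ih, hmt]; dsimp only; rw [if_pos (by omega : mm < r.sum),
              PySem.List.index?_cons_self]
            simp
          · rw [if_neg h, ih, hmt]; dsimp only; rw [if_neg (by omega : ¬ mm < r.sum)]
      | some b' =>
          have hmax : PySem.List.max? (r.sum :: t.map (fun a => a.sum)) (fun x => x)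
              = some (max r.sum b') := max?_cons_some _ _ _ hmt
          have hbmem : b' ∈ t.map (fun a => a.sum) := PySem.List.max?_mem hmt
          obtain ⟨k, hk⟩ := Option.isSome_iff_exists.mp
            ((PySem.List.index?_isSome_iff (xs := t.map (fun a => a.sum)) (v := b')).mpr hbmem)
          rw [hmax]
          by_cases h : r.sum > mm
          · rw [if_pos h, ih, hmt]; dsimp only
            by_cases h2 : r.sum < b'
            · rw [if_pos h2, if_pos (by omega : mm < max r.sum b'),
                show max r.sum b' = b' by omega,
                PySem.List.index?_cons_of_ne _ (by omega : r.sum ≠ b'), hk]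
              simp only [Option.map_some, Option.getD_some]
              push_cast
              ring_nf
            · rw [if_neg h2, if_pos (by omega : mm < max r.sum b'),
                show max r.sum b' = r.sum by omega,
                PySem.List.index?_cons_self]
              simp
          · rw [if_neg h, ih, hmt]; dsimp only
            by_cases h2 : mm < b'
            · rw [if_pos h2, if_pos (by omega : mm < max r.sum b'),
                show max r.sum b' = b' by omega,
                PySem.List.index?_cons_of_ne _ (by omega : r.sum ≠ b'), hk]
              simp only [Option.map_some, Option.getD_some]
              push_cast
              ring_nf
            · rw [if_neg h2, if_neg (by omega : ¬ mm < max r.sum b')]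

-- ===== VERDICT (by name: the statement is the Claim_ definition above) =====
theorem wealthiest_customer_spec : Claim_unchanged_wealthiest_customer := by
  intro accounts _ hpre
  unfold Spec_wealthiest_customer
  intro hnd
  unfold wealthiest_customer wealthiest_customer_alt
  rw [loopA_char]
  cases hm : PySem.List.max? (accounts.map (fun a => a.sum)) (fun x => x) with
  | none =>
      exact absurd (List.map_eq_nil_iff.mp ((PySem.List.max?_eq_none_iff _ _).mp hm)) hpre
  | some b =>
      simp only [hm, Option.getD_some]
      by_cases h : 0 < b
      · rw [if_pos h]; simp
      · rw [if_neg h]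
        have hle : ∀ t ∈ accounts.map (fun a => a.sum), t ≤ 0 := by
          intro t ht
          have := PySem.List.max?_isMax hm t ht
          omega
        have hh : (accounts.map (fun a => a.sum)).head? = some 0 := by
          by_contra hne
          exact hnd ⟨hpre, hle, hne⟩
        cases hacc : accounts with
        | nil => exact absurd hacc hpre
        | cons r t =>
            subst hacc
            simp only [List.map_cons, List.head?_cons, Option.some.injEq] at hh
            have hb0 : b = 0 := by
              have hmem := PySem.List.max?_mem hm
              have h1 := PySem.List.max?_isMax hm r.sum (by simp)
              simp only at h1
              omega
            subst hb0
            simp only [List.map_cons]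
            rw [hh, PySem.List.index?_cons_self]
            simp

theorem wealthiest_customer_changed : Claim_changed_wealthiest_customer := by
  unfold Claim_changed_wealthiest_customer; decide

theorem wealthiest_customer_tight : Claim_exact_wealthiest_customer := by
  intro accounts _ hpre hD
  obtain ⟨hne, hle, hh⟩ := hD
  unfold wealthiest_customer wealthiest_customer_alt
  rw [loopA_char]
  cases hm : PySem.List.max? (accounts.map (fun a => a.sum)) (fun x => x) with
  | none =>
      exact absurd (List.map_eq_nil_iff.mp ((PySem.List.max?_eq_none_iff _ _).mp hm)) hne
  | some b =>
      simp only [hm, Option.getD_some]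
      have hb : b ≤ 0 := hle b (PySem.List.max?_mem hm)
      rw [if_neg (by omega : ¬ (0:Int) < b)]
      by_cases hb0 : b = 0
      · subst hb0
        cases hacc : accounts with
        | nil => exact absurd hacc hne
        | cons r t =>
            subst hacc
            simp only [List.map_cons, List.head?_cons] at hh
            have hmem : (0:Int) ∈ r.sum :: t.map (fun a => a.sum) := by
              have := PySem.List.max?_mem hm
              simpa using this
            have hmem' : (0:Int) ∈ t.map (fun a => a.sum) := by
              rcases List.mem_cons.mp hmem with h | h
              · exact absurd h.symm (by simpa using hh)
              · exact h
            obtain ⟨k, hk⟩ := Option.isSome_iff_exists.mp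
              ((PySem.List.index?_isSome_iff (xs := t.map (fun a => a.sum)) (v := 0)).mpr hmem')
            simp only [List.map_cons]
            rw [PySem.List.index?_cons_of_ne _ (by simpa using hh), hk]
            simp only [Option.map_some, Option.getD_some]
            intro hcontra
            have := List.head_eq_of_cons_eq hcontra
            omega
      · intro hcontra
        have := List.head_eq_of_cons_eq (List.tail_eq_of_cons_eq hcontra)
        omega
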